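-- pv_equiv track=rewrite | github.com/maokun2022/JackystanCodeprojects | JackystanCodeprojects/JackystanCodeprojects/bobble_game_solver/boggle.py | form_check
-- ===== SOURCE A (Python) =====
-- def form_check(s):
-- 	# s1-s4 should be "alpha -> ' ' -> alpha -> ' ' -> alpha -> ' ' -> alpha"
-- 	# index              0       1       2       3       4       5       6
-- 	if len(s) != 7:
-- 		return False
-- 	else:
-- 		for i in range(len(s)):
-- 			ch = s[i]
-- 			if i % 2 == 0 and ch.isalpha():
-- 				pass
-- 			elif i % 2 == 1 and ch == ' ':
-- 				pass
-- 			else: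
-- 				return False
-- 		return True
-- ===== SOURCE B (Python) =====
-- def form_check(s):
--     if len(s) != 7:
--         return False
--     return all(ch.isalpha() for ch in s[0::2]) and all(ch == ' ' for ch in s[1::2])
-- ===== Notes on version B (the rewrite author's own statement) =====
-- stated objective: simpler
-- what changed: Replaces the index loop with per-position parity branching by two separate passes over the step-2 slices: all letters at even positions, all spaces at odd positions.
import Mathlib
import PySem

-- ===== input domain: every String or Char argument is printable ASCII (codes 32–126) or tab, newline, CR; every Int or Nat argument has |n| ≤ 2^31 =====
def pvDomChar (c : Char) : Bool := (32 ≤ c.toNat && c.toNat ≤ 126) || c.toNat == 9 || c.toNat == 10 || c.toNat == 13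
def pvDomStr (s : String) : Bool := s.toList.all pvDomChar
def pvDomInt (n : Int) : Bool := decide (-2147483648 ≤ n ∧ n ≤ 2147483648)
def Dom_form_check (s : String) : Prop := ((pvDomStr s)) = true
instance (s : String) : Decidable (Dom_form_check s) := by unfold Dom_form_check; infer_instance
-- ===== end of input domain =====

-- B validates the two interleaved positional roles in two slice passes instead of A's
-- parity-branching index loop; objective: simpler. Return-value equivalence, no side effects.

-- ===== PORT A =====
-- the 'for i in range(len(s)): ch = s[i]; …' loop with its early 'return False'
def formCheckLoop : List (Int × Char) → Bool
  | [] => true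
  | (i, ch) :: rest =>
    if i % 2 == 0 && PySem.Chars.isalpha ch then formCheckLoop rest
    else if i % 2 == 1 && ch == ' ' then formCheckLoop rest
    else false

def form_check (s : String) : Bool :=
  if s.toList.length ≠ 7 then false
  else formCheckLoop (PySem.List.enumerate s.toList 0)

-- ===== PORT B =====
-- hand port of the step-2 slice xs[0::2] (PySem.List.slice has no step); exact for a
-- nonnegative start 0 and step 2: every other element starting at the head
def everyOther : List Char → List Char
  | [] => []
  | [c] => [c]
  | c :: _ :: rest => c :: everyOther rest

def form_check_alt (s : String) : Bool :=
  if s.toList.length ≠ 7 then false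
  else (everyOther s.toList).all PySem.Chars.isalpha
       && (everyOther s.toList.tail).all (· == ' ')

-- ===== PRECONDITION & SPEC =====
def Spec_form_check (s : String) (out : Bool) : Prop := out = form_check_alt s
instance (s : String) (out : Bool) : Decidable (Spec_form_check s out) := by unfold Spec_form_check; infer_instance

-- ===== CLAIM (what is proved, stated in full; the proofs are below) =====
def Claim_equal_form_check : Prop := ∀ (s : String), Dom_form_check s → Spec_form_check s (form_check s)

-- ===== LEMMAS AND PROOFS =====

theorem len7_destruct {α : Type} (l : List α) (h : l.length = 7) :
    ∃ a b c d e f g, l = [a, b, c, d, e, f, g] := by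
  match l, h with
  | [a, b, c, d, e, f, g], _ => exact ⟨a, b, c, d, e, f, g, rfl⟩

-- ===== VERDICT (by name: the statement is the Claim_ definition above) =====
theorem form_check_spec : Claim_equal_form_check := by
  intro s _
  unfold Spec_form_check form_check form_check_alt
  by_cases h : s.toList.length = 7
  · obtain ⟨a, b, c, d, e, f, g, hl⟩ := len7_destruct s.toList h
    rw [hl]
    simp only [PySem.List.enumerate, formCheckLoop, everyOther, List.all, List.tail,
      List.length_cons, List.length_nil]
    cases PySem.Chars.isalpha a <;> cases PySem.Chars.isalpha c <;>
      cases PySem.Chars.isalpha e <;> cases PySem.Chars.isalpha g <;>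
      cases b == ' ' <;> cases d == ' ' <;> cases f == ' ' <;> simp
  · simp [show ¬ s.length = 7 from by simpa using h]
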